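-- pv_equiv track=rewrite | github.com/tmdrl980430/Algorithm | Python/Programmers/Seungki/Brute_Force/20260202_2.py | solution
-- ===== SOURCE A (Python) =====
-- def solution(answers):
--
--     arr1 = [1,2,3,4,5]
--     arr2 = [2,1,2,3,2,4,2,5]
--     arr3 = [3,3,1,1,2,2,4,4,5,5]
--     result = [0,0,0]
--     answer = []
--     one = 0
--     two = 0
--     three = 0
--
--     for i in answers:
--         if i == arr1[one]:
--             result[0] = result[0] + 1
--         if i == arr2[two]:
--             result[1] = result[1] + 1
--         if i == arr3[three]:
--             result[2] = result[2] + 1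
--         one += 1
--         two += 1
--         three += 1
--         if one == len(arr1):
--             one = 0
--         if two == len(arr2):
--             two = 0
--         if three == len(arr3):
--             three = 0
--
--     cnt = 1
--     for i in result:
--         if max(result) <= i:
--
--             answer.append(cnt)
--         cnt += 1
--     return answer
-- ===== SOURCE B (Python) =====
-- def solution(answers):
--     # Bucket answers into a frequency table keyed by (position mod 40, value)
--     # (40 = lcm of the pattern lengths 5, 8, 10), then read each pattern's
--     # score off the table as a 40-term lookup sum -- no per-element pattern
--     # comparison pass.
--     keys = [(i % 40, a) for i, a in enumerate(answers)]
--     cnt = {}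
--     for k in keys:
--         cnt[k] = cnt.get(k, 0) + 1
--     patterns = [[1, 2, 3, 4, 5],
--                 [2, 1, 2, 3, 2, 4, 2, 5],
--                 [3, 3, 1, 1, 2, 2, 4, 4, 5, 5]]
--     scores = [sum(cnt.get((r, p[r % len(p)]), 0) for r in range(40))
--               for p in patterns]
--     m = max(scores)
--     return [k + 1 for k, s in enumerate(scores) if s == m]
-- ===== Notes on version B (the rewrite author's own statement) =====
-- stated objective: alternative
-- what changed: A compares every answer against all three patterns in one pass with three manually wrapped counters; B instead buckets the answers once into a frequency dictionary keyed by (index mod 40, value) -- 40 being the lcm of the pattern lengths -- and computes each pattern's score as a fixed 40-term table-lookup sum, then filters the max.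
import Mathlib
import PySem

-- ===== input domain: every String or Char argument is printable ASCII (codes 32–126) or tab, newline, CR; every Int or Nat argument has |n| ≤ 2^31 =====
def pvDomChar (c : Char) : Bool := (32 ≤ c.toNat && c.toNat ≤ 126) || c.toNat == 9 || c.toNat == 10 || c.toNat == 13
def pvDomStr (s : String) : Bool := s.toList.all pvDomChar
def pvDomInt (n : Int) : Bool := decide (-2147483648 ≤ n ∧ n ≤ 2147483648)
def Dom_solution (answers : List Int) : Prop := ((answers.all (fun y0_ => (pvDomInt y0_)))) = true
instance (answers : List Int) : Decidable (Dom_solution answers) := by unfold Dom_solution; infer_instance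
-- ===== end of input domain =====

-- B replaces A's single comparison pass (three wrapped counters) by a frequency table
-- keyed by (index mod 40, value) read off as 40-term lookup sums (alternative algorithm, same cost).


-- ===== PORT A =====
def pvArr1 : List Int := [1, 2, 3, 4, 5]
def pvArr2 : List Int := [2, 1, 2, 3, 2, 4, 2, 5]
def pvArr3 : List Int := [3, 3, 1, 1, 2, 2, 4, 4, 5, 5]

-- A's main for-loop: state = (result0, result1, result2, one, two, three).
-- The arr indices are always in range (the counters wrap before reaching len), so getD is exact.
def pvLoopA : List Int → Int → Int → Int → Nat → Nat → Nat → Int × Int × Int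
  | [], r1, r2, r3, _, _, _ => (r1, r2, r3)
  | i :: rest, r1, r2, r3, one, two, three =>
    let r1 := if i = pvArr1.getD one 0 then r1 + 1 else r1
    let r2 := if i = pvArr2.getD two 0 then r2 + 1 else r2
    let r3 := if i = pvArr3.getD three 0 then r3 + 1 else r3
    let one := one + 1
    let two := two + 1
    let three := three + 1
    let one := if one = pvArr1.length then 0 else one
    let two := if two = pvArr2.length then 0 else two
    let three := if three = pvArr3.length then 0 else three
    pvLoopA rest r1 r2 r3 one two three

def solution (answers : List Int) : List Int :=
  let r := pvLoopA answers 0 0 0 0 0 0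
  let result : List Int := [r.1, r.2.1, r.2.2]
  -- second loop: cnt = 1; for i in result: if max(result) <= i: answer.append(cnt); cnt += 1
  (result.foldl
    (fun (st : List Int × Int) i =>
      ((if (PySem.List.max? result (fun y => y)).getD 0 ≤ i then st.1 ++ [st.2] else st.1),
       st.2 + 1))
    ([], 1)).1

-- ===== PORT B =====
def solution_alt (answers : List Int) : List Int :=
  -- keys = [(i % 40, a) for i, a in enumerate(answers)]
  let keys := (PySem.List.enumerate answers 0).map
    (fun ia => (PySem.Int.mod ia.1 40, ia.2))
  -- cnt = {}; for k in keys: cnt[k] = cnt.get(k, 0) + 1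
  let cnt := keys.foldl
    (fun (d : PySem.Dict (Int × Int) Int) k => d.insert k (d.getD k 0 + 1))
    PySem.Dict.empty
  let patterns : List (List Int) :=
    [[1, 2, 3, 4, 5], [2, 1, 2, 3, 2, 4, 2, 5], [3, 3, 1, 1, 2, 2, 4, 4, 5, 5]]
  -- scores = [sum(cnt.get((r, p[r % len(p)]), 0) for r in range(40)) for p in patterns]
  let scores := patterns.map (fun p =>
    (PySem.List.pyRange 0 40 1).foldl
      (fun s r =>
        s + cnt.getD (r, PySem.List.pyGetD p (PySem.Int.mod r (p.length : Int)) 0) 0) 0)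
  let m := (PySem.List.max? scores (fun y => y)).getD 0
  (PySem.List.enumerate scores 0).foldl
    (fun acc ks => if ks.2 = m then acc ++ [ks.1 + 1] else acc) []

-- ===== PRECONDITION & SPEC =====
def Spec_solution (answers : List Int) (out : List Int) : Prop := out = solution_alt answers
instance (answers : List Int) (out : List Int) : Decidable (Spec_solution answers out) := by unfold Spec_solution; infer_instance

-- ===== CLAIM (what is proved, stated in full; the proofs are below) =====
def Claim_equal_solution : Prop := ∀ (answers : List Int), Dom_solution answers → Spec_solution answers (solution answers)

-- ===== LEMMAS AND PROOFS =====

-- canonical spec: sum of matches against pattern p, starting at absolute position n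
def pvScoreFrom (p : List Int) : List Int → Nat → Int
  | [], _ => 0
  | a :: rest, n => (if a = p.getD (n % p.length) 0 then 1 else 0) + pvScoreFrom p rest (n + 1)

-- the lookup key function of pattern p
def pvQ (p : List Int) (r : Int) : Int :=
  PySem.List.pyGetD p (PySem.Int.mod r (p.length : Int)) 0

theorem pvLoopA_eq (xs : List Int) : ∀ (n : Nat) (r1 r2 r3 : Int),
    pvLoopA xs r1 r2 r3 (n % 5) (n % 8) (n % 10)
      = (r1 + pvScoreFrom pvArr1 xs n, r2 + pvScoreFrom pvArr2 xs n,
         r3 + pvScoreFrom pvArr3 xs n) := by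
  induction xs with
  | nil => intro n r1 r2 r3; simp [pvLoopA, pvScoreFrom]
  | cons a rest ih =>
    intro n r1 r2 r3
    have l1 : pvArr1.length = 5 := by decide
    have l2 : pvArr2.length = 8 := by decide
    have l3 : pvArr3.length = 10 := by decide
    have h1 : (if n % 5 + 1 = pvArr1.length then 0 else n % 5 + 1) = (n + 1) % 5 := by
      rw [l1]; split_ifs <;> omega
    have h2 : (if n % 8 + 1 = pvArr2.length then 0 else n % 8 + 1) = (n + 1) % 8 := by
      rw [l2]; split_ifs <;> omega
    have h3 : (if n % 10 + 1 = pvArr3.length then 0 else n % 10 + 1) = (n + 1) % 10 := by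
      rw [l3]; split_ifs <;> omega
    simp only [pvLoopA, h1, h2, h3, ih (n + 1)]
    simp only [pvScoreFrom, l1, l2, l3]
    split_ifs <;> simp only [Prod.mk.injEq] <;> refine ⟨by omega, by omega, by omega⟩

-- PySem.Int.mod of a natural number by a positive natural modulus is Nat.mod, cast
theorem pvModCast (n m : Nat) (_hm : 0 < m) :
    PySem.Int.mod (n : Int) (m : Int) = ((n % m : Nat) : Int) := by
  simp [PySem.Int.mod, Int.fmod_eq_emod]

-- indicator sums over a list of first components
theorem pvSumInd_zero (q : Int → Int) (k : Int × Int) :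
    ∀ rs : List Int, k.1 ∉ rs →
    ((rs.map (fun r => if ((r, q r) : Int × Int) = k then (1 : Int) else 0)).sum) = 0 := by
  intro rs
  induction rs with
  | nil => intro _; simp
  | cons r rs ih =>
    intro h
    have hr : k.1 ≠ r := fun he => h (he ▸ List.mem_cons_self)
    have hne : ((r, q r) : Int × Int) ≠ k := by
      intro he; exact hr (by rw [← he])
    simp [hne, ih (fun hm => h (List.mem_cons_of_mem _ hm))]

theorem pvSumInd (q : Int → Int) (k : Int × Int) :
    ∀ rs : List Int, rs.Nodup → k.1 ∈ rs →
    ((rs.map (fun r => if ((r, q r) : Int × Int) = k then (1 : Int) else 0)).sum)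
      = if k.2 = q k.1 then 1 else 0 := by
  intro rs
  induction rs with
  | nil => intro _ h; simp at h
  | cons r rs ih =>
    intro hnd hm
    rcases List.mem_cons.mp hm with he | hm'
    · have hnotin : k.1 ∉ rs := by
        have := List.nodup_cons.mp hnd
        rw [he]; exact this.1
      have hz := pvSumInd_zero q k rs hnotin
      by_cases hq : k.2 = q k.1
      · have : ((r, q r) : Int × Int) = k := by
          rw [← he]; exact Prod.ext rfl (by rw [hq, he])
        simp [this, hz, hq]
      · have : ((r, q r) : Int × Int) ≠ k := by
          intro hcon
          apply hq
          have h1 : r = k.1 := congrArg Prod.fst hcon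
          have h2 : q r = k.2 := congrArg Prod.snd hcon
          rw [← h2, h1]
        simp [this, hz, hq]
    · have hnd' := (List.nodup_cons.mp hnd).2
      have hr : k.1 ≠ r := by
        intro he
        exact (List.nodup_cons.mp hnd).1 (he ▸ hm')
      have hne : ((r, q r) : Int × Int) ≠ k := by
        intro he; exact hr (by rw [← he])
      simp [hne, ih hnd' hm']

-- swap the double count: summing counts over distinct slots = summing matches over keys
theorem pvCountSum (q : Int → Int) (rs : List Int) (hnd : rs.Nodup) :
    ∀ ks : List (Int × Int), (∀ k ∈ ks, k.1 ∈ rs) →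
    ((rs.map (fun r => ((ks.count ((r, q r) : Int × Int) : Nat) : Int))).sum)
      = ((ks.map (fun k => if k.2 = q k.1 then (1 : Int) else 0)).sum) := by
  intro ks
  induction ks with
  | nil => intro _; simp
  | cons k ks ih =>
    intro h
    have hmem : k.1 ∈ rs := h k List.mem_cons_self
    have step : ∀ r : Int,
        (((k :: ks).count ((r, q r) : Int × Int) : Nat) : Int)
          = ((ks.count ((r, q r) : Int × Int) : Nat) : Int)
            + (if ((r, q r) : Int × Int) = k then (1 : Int) else 0) := by
      intro r
      rw [List.count_cons]
      push_cast
      by_cases he : ((r, q r) : Int × Int) = k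
      · simp [he]
      · have he' : k ≠ (r, q r) := fun hx => he hx.symm
        simp [he, he']
    calc ((rs.map (fun r => (((k :: ks).count ((r, q r) : Int × Int) : Nat) : Int))).sum)
        = ((rs.map (fun r => ((ks.count ((r, q r) : Int × Int) : Nat) : Int)
            + (if ((r, q r) : Int × Int) = k then (1 : Int) else 0))).sum) := by
          exact congrArg List.sum (List.map_congr_left (fun r _ => step r))
      _ = ((rs.map (fun r => ((ks.count ((r, q r) : Int × Int) : Nat) : Int))).sum)
            + ((rs.map (fun r => if ((r, q r) : Int × Int) = k then (1 : Int) else 0)).sum) := by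
          rw [← List.sum_map_add]
      _ = ((ks.map (fun kk => if kk.2 = q kk.1 then (1 : Int) else 0)).sum)
            + (if k.2 = q k.1 then 1 else 0) := by
          rw [ih (fun kk hk => h kk (List.mem_cons_of_mem _ hk)),
            pvSumInd q k rs hnd hmem]
      _ = (((k :: ks).map (fun kk => if kk.2 = q kk.1 then (1 : Int) else 0)).sum) := by
          simp [add_comm]

-- the per-element match indicator sums to pvScoreFrom
theorem pvMatchSum (p : List Int) (hpos : 0 < p.length) (hdvd : p.length ∣ 40)
    (xs : List Int) : ∀ n : Nat,
    ((PySem.List.enumerate xs (n : Int)).map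
      (fun ia => if ia.2 = pvQ p (PySem.Int.mod ia.1 40) then (1 : Int) else 0)).sum
      = pvScoreFrom p xs n := by
  induction xs with
  | nil => intro n; simp [PySem.List.enumerate_nil, pvScoreFrom]
  | cons a rest ih =>
    intro n
    have hm40 : PySem.Int.mod (n : Int) 40 = ((n % 40 : Nat) : Int) :=
      pvModCast n 40 (by omega)
    have hq : pvQ p ((n % 40 : Nat) : Int) = p.getD (n % p.length) 0 := by
      unfold pvQ
      rw [pvModCast (n % 40) p.length hpos, PySem.List.pyGetD_natCast,
        Nat.mod_mod_of_dvd n hdvd]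
    have hn1 : ((n : Int) + 1) = ((n + 1 : Nat) : Int) := by push_cast; ring
    simp only [PySem.List.enumerate_cons, List.map_cons, List.sum_cons, hm40, hq,
      hn1, ih, pvScoreFrom]

-- B's score for pattern p is pvScoreFrom p answers 0
theorem pvScoreB_eq (p : List Int) (hpos : 0 < p.length) (hdvd : p.length ∣ 40)
    (answers : List Int) :
    ((PySem.List.pyRange 0 40 1).foldl
      (fun s r =>
        s + (((PySem.List.enumerate answers 0).map
                (fun ia => (PySem.Int.mod ia.1 40, ia.2))).foldl
              (fun (d : PySem.Dict (Int × Int) Int) k => d.insert k (d.getD k 0 + 1))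
              PySem.Dict.empty).getD
            (r, PySem.List.pyGetD p (PySem.Int.mod r (p.length : Int)) 0) 0) 0)
      = pvScoreFrom p answers 0 := by
  set keys := ((PySem.List.enumerate answers 0).map
    (fun ia => (PySem.Int.mod ia.1 40, ia.2))) with hkeys
  have hcnt : ∀ x : Int × Int,
      (keys.foldl
        (fun (d : PySem.Dict (Int × Int) Int) k => d.insert k (d.getD k 0 + 1))
        PySem.Dict.empty).getD x 0 = ((keys.count x : Nat) : Int) := by
    intro x
    rw [PySem.Dict.getD_foldl_insert_add_one, PySem.Dict.getD_empty]
    simp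
  rw [PySem.List.foldl_add]
  have hmemkeys : ∀ k ∈ keys, k.1 ∈ PySem.List.pyRange 0 40 1 := by
    intro k hk
    rw [hkeys] at hk
    rcases List.mem_map.mp hk with ⟨ia, hia, hke⟩
    rcases (PySem.List.mem_enumerate_iff _ _ _).mp hia with ⟨j, hj, hiae⟩
    subst hiae
    rw [← hke]
    show PySem.Int.mod ((0 : Int) + (j : Nat)) 40 ∈ _
    have hmj := pvModCast j 40 (by omega)
    rw [show ((40 : Nat) : Int) = (40 : Int) by norm_num] at hmj
    rw [zero_add, hmj, PySem.List.mem_pyRange_one]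
    constructor
    · exact Int.natCast_nonneg _
    · exact_mod_cast Nat.mod_lt _ (by omega)
  have hmapcnt :
      (PySem.List.pyRange 0 40 1).map
        (fun r =>
          (keys.foldl
            (fun (d : PySem.Dict (Int × Int) Int) k => d.insert k (d.getD k 0 + 1))
            PySem.Dict.empty).getD (r, pvQ p r) 0)
        = (PySem.List.pyRange 0 40 1).map
            (fun r => ((keys.count ((r, pvQ p r) : Int × Int) : Nat) : Int)) :=
    List.map_congr_left (fun r _ => hcnt (r, pvQ p r))
  show 0 + ((PySem.List.pyRange 0 40 1).map
      (fun r =>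
        (keys.foldl
          (fun (d : PySem.Dict (Int × Int) Int) k => d.insert k (d.getD k 0 + 1))
          PySem.Dict.empty).getD (r, pvQ p r) 0)).sum = _
  rw [zero_add, hmapcnt,
    pvCountSum (pvQ p) (PySem.List.pyRange 0 40 1) (PySem.List.nodup_pyRange_one 0 40) keys hmemkeys]
  have hmapmap :
      keys.map (fun k => if k.2 = pvQ p k.1 then (1 : Int) else 0)
        = (PySem.List.enumerate answers 0).map
            (fun ia => if ia.2 = pvQ p (PySem.Int.mod ia.1 40) then (1 : Int) else 0) := by
    rw [hkeys, List.map_map]; rfl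
  rw [hmapmap]
  exact pvMatchSum p hpos hdvd answers 0

-- the two result loops agree for any three scores x y z
theorem pvFinal (x y z : Int) :
    (([x, y, z]).foldl
      (fun (st : List Int × Int) i =>
        ((if (PySem.List.max? [x, y, z] (fun y => y)).getD 0 ≤ i then st.1 ++ [st.2] else st.1),
         st.2 + 1)) ([], 1)).1
    = (PySem.List.enumerate [x, y, z] 0).foldl
        (fun acc is =>
          if is.2 = (PySem.List.max? [x, y, z] (fun y => y)).getD 0 then acc ++ [is.1 + 1]
          else acc) [] := by
  rw [PySem.List.max?_id_cons]
  have key : ∀ M : Int, x ≤ M → y ≤ M → z ≤ M →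
      (([x, y, z]).foldl
        (fun (st : List Int × Int) i =>
          ((if M ≤ i then st.1 ++ [st.2] else st.1), st.2 + 1)) ([], 1)).1
      = (PySem.List.enumerate [x, y, z] 0).foldl
          (fun acc is => if is.2 = M then acc ++ [is.1 + 1] else acc) [] := by
    intro M hx hy hz
    simp only [List.foldl_cons, List.foldl_nil, PySem.List.enumerate_cons,
      PySem.List.enumerate_nil]
    split_ifs <;> first | rfl | (exfalso; omega)
  have hfold : [y, z].foldl max x = max (max x y) z := by
    simp [List.foldl]
  rw [hfold, Option.getD_some]
  exact key _ (le_trans (le_max_left x y) (le_max_left _ z))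
    (le_trans (le_max_right x y) (le_max_left _ z)) (le_max_right _ z)

-- ===== VERDICT =====
theorem solution_spec : Claim_equal_solution := by
  intro answers _
  unfold Spec_solution solution solution_alt
  have hA := pvLoopA_eq answers 0 0 0 0
  simp only [Nat.zero_mod, zero_add] at hA
  rw [hA]
  have e1 := pvScoreB_eq pvArr1 (by decide) (by decide) answers
  have e2 := pvScoreB_eq pvArr2 (by decide) (by decide) answers
  have e3 := pvScoreB_eq pvArr3 (by decide) (by decide) answers
  simp only [pvArr1, pvArr2, pvArr3] at e1 e2 e3
  simp only [List.map_cons, List.map_nil, e1, e2, e3]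
  exact pvFinal _ _ _
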